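-- pv_equiv track=rewrite | github.com/nykim627/Algorithm | 프로그래머스/0/120843. 공 던지기/공 던지기.py | solution
-- ===== SOURCE A (Python) =====
-- def solution(numbers, k):
--     answer = 0
--     i = 1
--     n = 0
--     while i<k:
--         if n<(len(numbers)-2):
--             n = n+2
--             i+=1
--         elif n==(len(numbers)-2):
--             n = 0
--             i+=1
--         elif n==(len(numbers)-1):
--             n = 1
--             i+=1
--         if i==k:
--             answer = numbers[n]
--             break
--     return answer
-- ===== SOURCE B (Python) =====
-- def solution(numbers, k):
--     # O(1) closed form: the ball index advances by 2 (mod len) per throw;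
--     # keep A's k<=1 behaviour (answer stays 0, the loop never runs).
--     if k <= 1:
--         return 0
--     return numbers[(2 * (k - 1)) % len(numbers)]
-- ===== Notes on version B (the rewrite author's own statement) =====
-- stated objective: faster
-- what changed: Replaced the O(k) simulation loop stepping the index by 2 with the closed-form modular index numbers[(2*(k-1)) % len(numbers)], keeping the k<=1 edge where A's loop never runs and returns 0.
import Mathlib
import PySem

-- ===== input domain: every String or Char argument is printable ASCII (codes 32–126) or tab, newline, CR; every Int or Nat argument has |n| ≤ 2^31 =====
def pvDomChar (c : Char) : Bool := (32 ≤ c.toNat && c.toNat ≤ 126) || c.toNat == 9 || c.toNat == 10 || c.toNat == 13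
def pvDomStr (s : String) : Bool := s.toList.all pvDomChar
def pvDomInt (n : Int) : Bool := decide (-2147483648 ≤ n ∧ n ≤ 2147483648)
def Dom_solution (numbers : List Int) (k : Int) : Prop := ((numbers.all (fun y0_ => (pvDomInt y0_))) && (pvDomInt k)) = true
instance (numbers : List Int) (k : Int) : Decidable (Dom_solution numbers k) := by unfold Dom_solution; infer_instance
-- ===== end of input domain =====

-- B replaces A's O(k) throw-by-throw simulation with the O(1) closed-form
-- modular index numbers[(2*(k-1)) % len(numbers)] (k ≤ 1 still yields 0).


-- ===== PORT A =====
-- A's while loop; fuel = remaining loop entries (inside Pre_ the loop runs at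
-- most k-1 times, each entry increments i, so fuel k.toNat suffices; when no
-- branch fires Python re-enters the loop unchanged, i.e. diverges — only
-- outside Pre_).  Python's 'if i==k: answer=numbers[n]; break' is checked
-- after each branch; numbers[n] is pyGet? with default 0 (in range whenever
-- Pre_ holds, so the default is never the result inside Pre_).
def solutionLoop (numbers : List Int) (k : Int) : Nat → Int → Int → Int → Int
  | 0, _, _, answer => answer
  | fuel+1, i, n, answer =>
    if i < k then
      if n < (numbers.length : Int) - 2 then
        if i + 1 = k then (PySem.List.pyGet? numbers (n + 2)).getD 0
        else solutionLoop numbers k fuel (i + 1) (n + 2) answer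
      else if n = (numbers.length : Int) - 2 then
        if i + 1 = k then (PySem.List.pyGet? numbers 0).getD 0
        else solutionLoop numbers k fuel (i + 1) 0 answer
      else if n = (numbers.length : Int) - 1 then
        if i + 1 = k then (PySem.List.pyGet? numbers 1).getD 0
        else solutionLoop numbers k fuel (i + 1) 1 answer
      else solutionLoop numbers k fuel i n answer
    else answer

def solution (numbers : List Int) (k : Int) : Int :=
  solutionLoop numbers k k.toNat 1 0 0

-- ===== PORT B =====
def solution_alt (numbers : List Int) (k : Int) : Int :=
  if k ≤ 1 then 0
  else (PySem.List.pyGet? numbers (PySem.Int.mod (2 * (k - 1)) numbers.length)).getD 0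

-- ===== PRECONDITION & SPEC =====
-- A raises IndexError or diverges when the list has fewer than two elements
-- and k ≥ 2; for k ≤ 1 the loop never runs, so any list is fine.
def Pre_solution (numbers : List Int) (k : Int) : Prop :=
  k ≤ 1 ∨ 2 ≤ numbers.length
instance (numbers : List Int) (k : Int) : Decidable (Pre_solution numbers k) := by
  unfold Pre_solution; infer_instance

def pvWitness_solution : List Int × Int := ([1, 2, 3, 4], 3)

def Spec_solution (numbers : List Int) (k : Int) (out : Int) : Prop := out = solution_alt numbers k
instance (numbers : List Int) (k : Int) (out : Int) : Decidable (Spec_solution numbers k out) := by unfold Spec_solution; infer_instance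

-- ===== CLAIM (what is proved, stated in full; the proofs are below) =====
def Claim_equal_solution : Prop := ∀ (numbers : List Int) (k : Int), Dom_solution numbers k → Pre_solution numbers k → Spec_solution numbers k (solution numbers k)

-- ===== LEMMAS AND PROOFS =====

-- the three loop branches each turn the index (2*a) % L into (2*(a+1)) % L
lemma mod_step_lt (L a : Int) (hL : 2 ≤ L) (h : (2*a) % L < L - 2) :
    (2*a) % L + 2 = (2*(a+1)) % L := by
  have h0 : 0 ≤ (2*a) % L := Int.emod_nonneg _ (by omega)
  have hd := Int.emod_add_ediv (2*a) L
  have he : 2*(a+1) = ((2*a) % L + 2) + L * ((2*a) / L) := by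
    have : 2*(a+1) = 2*a + 2 := by ring
    omega
  have h5 : (2*(a+1)) % L = ((2*a) % L + 2) % L := by
    rw [he, Int.add_mul_emod_self_left]
  rw [h5]
  exact (Int.emod_eq_of_lt (by omega) (by omega)).symm

lemma mod_step_wrap (L a : Int) (hL : 2 ≤ L) (h : (2*a) % L = L - 2) :
    (0 : Int) = (2*(a+1)) % L := by
  have hd := Int.emod_add_ediv (2*a) L
  have he : 2*(a+1) = 0 + L * ((2*a) / L + 1) := by
    have h1 : L * ((2*a) / L + 1) = L * ((2*a) / L) + L := by ring
    have h2 : 2*(a+1) = 2*a + 2 := by ring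
    omega
  rw [he, Int.add_mul_emod_self_left, Int.emod_eq_of_lt (by omega) (by omega)]

lemma mod_step_last (L a : Int) (hL : 2 ≤ L) (h : (2*a) % L = L - 1) :
    (1 : Int) = (2*(a+1)) % L := by
  have hd := Int.emod_add_ediv (2*a) L
  have he : 2*(a+1) = 1 + L * ((2*a) / L + 1) := by
    have h1 : L * ((2*a) / L + 1) = L * ((2*a) / L) + L := by ring
    have h2 : 2*(a+1) = 2*a + 2 := by ring
    omega
  rw [he, Int.add_mul_emod_self_left, Int.emod_eq_of_lt (by omega) (by omega)]

-- loop invariant: at the top of each iteration n = (2*(i-1)) % len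
lemma loop_eq (numbers : List Int) (k : Int) (hL : 2 ≤ (numbers.length : Int)) :
    ∀ (fuel : Nat) (i answer : Int), i < k → (k - i).toNat ≤ fuel →
      solutionLoop numbers k fuel i ((2 * (i - 1)) % (numbers.length : Int)) answer =
        (PySem.List.pyGet? numbers ((2 * (k - 1)) % (numbers.length : Int))).getD 0 := by
  intro fuel
  induction fuel with
  | zero => intro i answer hik hf; omega
  | succ fuel ih =>
    intro i answer hik hf
    set L : Int := (numbers.length : Int) with hLdef
    have h0 : 0 ≤ (2*(i-1)) % L := Int.emod_nonneg _ (by omega)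
    have h1 : (2*(i-1)) % L < L := Int.emod_lt_of_pos _ (by omega)
    have hnext : ∀ n' : Int, n' = (2*((i+1)-1)) % L →
        (if i + 1 = k then (PySem.List.pyGet? numbers n').getD 0
         else solutionLoop numbers k fuel (i+1) n' answer) =
        (PySem.List.pyGet? numbers ((2 * (k - 1)) % L)).getD 0 := by
      intro n' hn'
      by_cases hk : i + 1 = k
      · rw [if_pos hk, hn', hk]
      · rw [if_neg hk, hn']
        exact ih (i+1) answer (by omega) (by omega)
    simp only [solutionLoop, if_pos hik]
    by_cases ha : (2*(i-1)) % L < L - 2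
    · rw [if_pos ha]
      exact hnext _ (by rw [show (2*((i+1)-1)) = 2*((i-1)+1) by ring,
        ← mod_step_lt L (i-1) hL ha])
    · rw [if_neg ha]
      by_cases hb : (2*(i-1)) % L = L - 2
      · rw [if_pos hb]
        exact hnext _ (by rw [show (2*((i+1)-1)) = 2*((i-1)+1) by ring,
          ← mod_step_wrap L (i-1) hL hb])
      · rw [if_neg hb, if_pos (by omega : (2*(i-1)) % L = L - 1)]
        exact hnext _ (by rw [show (2*((i+1)-1)) = 2*((i-1)+1) by ring,
          ← mod_step_last L (i-1) hL (by omega)])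

-- ===== VERDICT (by name: the statement is the Claim_ definition above) =====
theorem solution_spec : Claim_equal_solution := by
  intro numbers k _ hpre
  unfold Spec_solution solution solution_alt
  by_cases hk : k ≤ 1
  · rw [if_pos hk]
    match h : k.toNat with
    | 0 => simp [solutionLoop]
    | fuel + 1 =>
      simp only [solutionLoop]
      rw [if_neg (by omega)]
  · rw [if_neg hk]
    have hL : 2 ≤ (numbers.length : Int) := by
      rcases hpre with h | h
      · omega
      · exact_mod_cast h
    rw [PySem.Int.mod_eq_emod_of_pos (by omega : (0:Int) < (numbers.length : Int))]
    have h0 : (2 * ((1:Int) - 1)) % (numbers.length : Int) = 0 := by norm_num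
    calc solutionLoop numbers k k.toNat 1 0 0
        = solutionLoop numbers k k.toNat 1 ((2 * ((1:Int) - 1)) % (numbers.length : Int)) 0 := by
          rw [h0]
      _ = (PySem.List.pyGet? numbers ((2 * (k - 1)) % (numbers.length : Int))).getD 0 :=
          loop_eq numbers k hL k.toNat 1 0 (by omega) (by omega)
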